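-- pv_equiv track=rewrite | github.com/Swiss-Epilepsy-Center/SEC-iEEG-Toolbox | sec_ieeg/coords.py | get_surrounding_voxel_coords
-- ===== SOURCE A (Python) =====
-- from itertools import product
--
-- def get_surrounding_voxel_coords(coord, voxel_shape):
--     x, y, z = coord
--     xs, ys, zs = voxel_shape
--     neighbors = []
--     for dx, dy, dz in product([-1, 0, 1], repeat=3):
--         if dx == dy == dz == 0:
--             continue
--         nx, ny, nz = x + dx, y + dy, z + dz
--         if 0 <= nx < xs and 0 <= ny < ys and 0 <= nz < zs:
--             neighbors.append((nx, ny, nz))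
--     return neighbors
-- ===== SOURCE B (Python) =====
-- def get_surrounding_voxel_coords(coord, voxel_shape):
--     x, y, z = coord
--     xs, ys, zs = voxel_shape
--     # Stage 1: build the whole in-bounds 3x3x3 block (centre included) by
--     # extending partial tuples axis by axis over clamped per-axis ranges.
--     block = [()]
--     for c, size in ((x, xs), (y, ys), (z, zs)):
--         block = [t + (v,) for t in block
--                  for v in range(max(0, c - 1), min(size, c + 2))]
--     # Stage 2: drop the centre cell in a separate pass.
--     return [t for t in block if t != (x, y, z)]
-- ===== Notes on version B (the rewrite author's own statement) =====
-- stated objective: alternative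
-- what changed: B replaces A's single triple-nested loop over the 27 offsets with staged passes: a fold over the three axes that grows a Cartesian product of clamped per-axis ranges (so no per-cell bounds test), followed by a separate filter pass that drops the centre cell.
import Mathlib
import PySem

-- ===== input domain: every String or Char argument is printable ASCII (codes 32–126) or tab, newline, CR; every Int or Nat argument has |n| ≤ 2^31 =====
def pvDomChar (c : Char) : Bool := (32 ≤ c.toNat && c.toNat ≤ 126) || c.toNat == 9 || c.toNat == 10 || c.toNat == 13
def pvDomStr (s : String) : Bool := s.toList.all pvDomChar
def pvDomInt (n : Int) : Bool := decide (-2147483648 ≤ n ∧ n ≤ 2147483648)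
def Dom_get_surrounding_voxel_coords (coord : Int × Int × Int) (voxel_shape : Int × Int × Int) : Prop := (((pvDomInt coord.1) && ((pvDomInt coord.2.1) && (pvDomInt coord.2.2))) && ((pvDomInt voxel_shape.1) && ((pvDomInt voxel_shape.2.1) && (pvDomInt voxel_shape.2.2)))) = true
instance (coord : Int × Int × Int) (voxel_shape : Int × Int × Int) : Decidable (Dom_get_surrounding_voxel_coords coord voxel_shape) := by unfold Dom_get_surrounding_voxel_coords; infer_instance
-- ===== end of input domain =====

-- B replaces A's triple loop over the 27 offsets (with a per-cell bounds test)
-- by staged passes: a fold over the three axes growing a Cartesian product of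
-- clamped per-axis ranges, then a separate filter pass dropping the centre cell
-- (objective: alternative decomposition).

-- ===== PORT A =====
-- list(product([-1, 0, 1], repeat=3)) in product order (last coordinate fastest)
def pvDeltas : List (Int × Int × Int) :=
  [(-1,-1,-1),(-1,-1,0),(-1,-1,1),(-1,0,-1),(-1,0,0),(-1,0,1),(-1,1,-1),(-1,1,0),(-1,1,1),
   (0,-1,-1),(0,-1,0),(0,-1,1),(0,0,-1),(0,0,0),(0,0,1),(0,1,-1),(0,1,0),(0,1,1),
   (1,-1,-1),(1,-1,0),(1,-1,1),(1,0,-1),(1,0,0),(1,0,1),(1,1,-1),(1,1,0),(1,1,1)]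

def get_surrounding_voxel_coords (coord : Int × Int × Int) (voxel_shape : Int × Int × Int) : List (Int × Int × Int) :=
  let x := coord.1; let y := coord.2.1; let z := coord.2.2
  let xs := voxel_shape.1; let ys := voxel_shape.2.1; let zs := voxel_shape.2.2
  pvDeltas.foldl (fun neighbors d =>
    if d.1 = 0 ∧ d.2.1 = 0 ∧ d.2.2 = 0 then neighbors
    else
      if 0 ≤ x + d.1 ∧ x + d.1 < xs ∧ 0 ≤ y + d.2.1 ∧ y + d.2.1 < ys ∧ 0 ≤ z + d.2.2 ∧ z + d.2.2 < zs then
        neighbors ++ [(x + d.1, y + d.2.1, z + d.2.2)]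
      else neighbors) []

-- ===== PORT B =====
-- Python's growing tuples () → (v,) → (v,w) → (v,w,u) are ported as List Int
def pvToTriple (t : List Int) : Option (Int × Int × Int) :=
  match t with
  | [a, b, c] => some (a, b, c)
  | _ => none

def get_surrounding_voxel_coords_alt (coord : Int × Int × Int) (voxel_shape : Int × Int × Int) : List (Int × Int × Int) :=
  let x := coord.1; let y := coord.2.1; let z := coord.2.2
  let xs := voxel_shape.1; let ys := voxel_shape.2.1; let zs := voxel_shape.2.2
  let block : List (List Int) :=
    [(x, xs), (y, ys), (z, zs)].foldl (fun block cs =>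
      block.flatMap (fun t =>
        (PySem.List.pyRange (max 0 (cs.1 - 1)) (min cs.2 (cs.1 + 2)) 1).map (fun v => t ++ [v])))
      [[]]
  -- final comprehension; the length-3 lists are converted back to the product
  -- type here (exact: after the three axes every element has length 3)
  (block.filter (fun t => decide (t ≠ [x, y, z]))).filterMap pvToTriple

-- ===== PRECONDITION & SPEC =====
def Spec_get_surrounding_voxel_coords (coord : Int × Int × Int) (voxel_shape : Int × Int × Int) (out : List (Int × Int × Int)) : Prop := out = get_surrounding_voxel_coords_alt coord voxel_shape
instance (coord : Int × Int × Int) (voxel_shape : Int × Int × Int) (out : List (Int × Int × Int)) : Decidable (Spec_get_surrounding_voxel_coords coord voxel_shape out) := by unfold Spec_get_surrounding_voxel_coords; infer_instance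

-- ===== CLAIM (what is proved, stated in full; the proofs are below) =====
def Claim_equal_get_surrounding_voxel_coords : Prop := ∀ (coord : Int × Int × Int) (voxel_shape : Int × Int × Int), Dom_get_surrounding_voxel_coords coord voxel_shape → Spec_get_surrounding_voxel_coords coord voxel_shape (get_surrounding_voxel_coords coord voxel_shape)

-- ===== LEMMAS AND PROOFS =====

-- the per-cell contribution of A's loop body at neighbor candidate (nx, ny, nz)
def pvCellA (x y z xs ys zs nx ny nz : Int) : List (Int × Int × Int) :=
  if nx = x ∧ ny = y ∧ nz = z then []
  else if 0 ≤ nx ∧ nx < xs ∧ 0 ≤ ny ∧ ny < ys ∧ 0 ≤ nz ∧ nz < zs then [(nx, ny, nz)]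
  else []

-- two strictly increasing integer lists with the same members are equal
theorem pv_eq_of_lt_of_mem : ∀ (l1 l2 : List Int), l1.Pairwise (· < ·) → l2.Pairwise (· < ·) →
    (∀ n, n ∈ l1 ↔ n ∈ l2) → l1 = l2 := by
  intro l1
  induction l1 with
  | nil =>
    intro l2 _ _ h
    cases l2 with
    | nil => rfl
    | cons b t => exact absurd ((h b).mpr List.mem_cons_self) (by simp)
  | cons a t ih =>
    intro l2 h1 h2 h
    cases l2 with
    | nil => exact absurd ((h a).mp List.mem_cons_self) (by simp)
    | cons b t2 =>
      rw [List.pairwise_cons] at h1 h2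
      have ha : a = b ∨ a ∈ t2 := by simpa using (h a).mp List.mem_cons_self
      have hb : b = a ∨ b ∈ t := by simpa using (h b).mpr List.mem_cons_self
      have hab : a = b := by
        rcases ha with h' | h'
        · exact h'
        · rcases hb with h'' | h''
          · exact h''.symm
          · have := h2.1 a h'
            have := h1.1 b h''
            omega
      subst hab
      have hmem : ∀ n, n ∈ t ↔ n ∈ t2 := by
        intro n
        constructor
        · intro hn
          have hlt := h1.1 n hn
          rcases List.mem_cons.mp ((h n).mp (List.mem_cons_of_mem _ hn)) with rfl | h2n
          · omega
          · exact h2n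
        · intro hn
          have hlt := h2.1 n hn
          rcases List.mem_cons.mp ((h n).mpr (List.mem_cons_of_mem _ hn)) with rfl | h1n
          · omega
          · exact h1n
      exact congrArg (List.cons a) (ih t2 h1.2 h2.2 hmem)

-- clamped pyRange = the three candidate coordinates filtered to in-bounds
theorem pv_clampRange (x s : Int) :
    PySem.List.pyRange (max 0 (x - 1)) (min s (x + 2)) 1 =
      [x - 1, x, x + 1].filter (fun n => decide (0 ≤ n) && decide (n < s)) := by
  apply pv_eq_of_lt_of_mem
  · exact PySem.List.pairwise_lt_pyRange_one _ _
  · apply List.Pairwise.filter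
    simp [List.pairwise_cons]
  · intro n
    simp [PySem.List.mem_pyRange_one, List.mem_filter]
    omega

-- flatMap over a filtered list = flatMap with the test folded inside
theorem pv_flatMap_filter {α β : Type} (p : α → Bool) (f : α → List β) :
    ∀ (l : List α), (l.filter p).flatMap f = l.flatMap (fun a => if p a then f a else []) := by
  intro l
  induction l with
  | nil => rfl
  | cons a t ih => by_cases hp : p a <;> simp [hp, ih]

-- map over a filtered list = flatMap with the test folded inside
theorem pv_map_filter {α β : Type} (p : α → Bool) (f : α → β) :
    ∀ (l : List α), (l.filter p).map f = l.flatMap (fun a => if p a then [f a] else []) := by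
  intro l
  induction l with
  | nil => rfl
  | cons a t ih => by_cases hp : p a <;> simp [hp, ih]

-- a filter distributes over flatMap
theorem pv_filter_flatMap {α β : Type} (p : β → Bool) (f : α → List β) :
    ∀ (l : List α), (l.flatMap f).filter p = l.flatMap (fun a => (f a).filter p) := by
  intro l
  induction l with
  | nil => rfl
  | cons a t ih => simp [List.flatMap_cons, List.filter_append, ih]

-- a filterMap distributes over flatMap
theorem pv_filterMap_flatMap {α β γ : Type} (g : β → Option γ) (f : α → List β) :
    ∀ (l : List α), (l.flatMap f).filterMap g = l.flatMap (fun a => (f a).filterMap g) := by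
  intro l
  induction l with
  | nil => rfl
  | cons a t ih => simp [List.flatMap_cons, List.filterMap_append, ih]

-- A's foldl as a flatMap of per-cell contributions
theorem pv_A_flatMap (x y z xs ys zs : Int) :
    get_surrounding_voxel_coords (x, y, z) (xs, ys, zs) =
      pvDeltas.flatMap (fun d => pvCellA x y z xs ys zs (x + d.1) (y + d.2.1) (z + d.2.2)) := by
  simp only [get_surrounding_voxel_coords]
  have hbody : (fun (neighbors : List (Int × Int × Int)) (d : Int × Int × Int) =>
      if d.1 = 0 ∧ d.2.1 = 0 ∧ d.2.2 = 0 then neighbors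
      else
        if 0 ≤ x + d.1 ∧ x + d.1 < xs ∧ 0 ≤ y + d.2.1 ∧ y + d.2.1 < ys ∧ 0 ≤ z + d.2.2 ∧ z + d.2.2 < zs then
          neighbors ++ [(x + d.1, y + d.2.1, z + d.2.2)]
        else neighbors)
      = fun neighbors d => neighbors ++ pvCellA x y z xs ys zs (x + d.1) (y + d.2.1) (z + d.2.2) := by
    funext acc d
    have hc : (x + d.1 = x ∧ y + d.2.1 = y ∧ z + d.2.2 = z) ↔ (d.1 = 0 ∧ d.2.1 = 0 ∧ d.2.2 = 0) := by omega
    simp only [pvCellA, hc]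
    split_ifs <;> simp
  rw [hbody, PySem.List.foldl_append_eq_flatMap]
  simp

-- A's flatMap over the 27 offsets, regrouped as three nested flatMaps over candidates
theorem pv_A_nested (x y z xs ys zs : Int) :
    pvDeltas.flatMap (fun d => pvCellA x y z xs ys zs (x + d.1) (y + d.2.1) (z + d.2.2)) =
      [x - 1, x, x + 1].flatMap (fun nx =>
        [y - 1, y, y + 1].flatMap (fun ny =>
          [z - 1, z, z + 1].flatMap (fun nz => pvCellA x y z xs ys zs nx ny nz))) := by
  have e1 : x + (-1 : Int) = x - 1 := by ring
  have e2 : x + (0 : Int) = x := by ring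
  have e3 : y + (-1 : Int) = y - 1 := by ring
  have e4 : y + (0 : Int) = y := by ring
  have e5 : z + (-1 : Int) = z - 1 := by ring
  have e6 : z + (0 : Int) = z := by ring
  simp [pvDeltas, e1, e2, e3, e4, e5, e6]

-- B's axes fold + filter pass as nested flatMaps over the clamped ranges
theorem pv_B_flatMap (x y z xs ys zs : Int) :
    get_surrounding_voxel_coords_alt (x, y, z) (xs, ys, zs) =
      (PySem.List.pyRange (max 0 (x - 1)) (min xs (x + 2)) 1).flatMap (fun nx =>
        (PySem.List.pyRange (max 0 (y - 1)) (min ys (y + 2)) 1).flatMap (fun ny =>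
          ((PySem.List.pyRange (max 0 (z - 1)) (min zs (z + 2)) 1).filter
              (fun nz => decide ((nx, ny, nz) ≠ (x, y, z)))).map (fun nz => (nx, ny, nz)))) := by
  simp only [get_surrounding_voxel_coords_alt, List.foldl_cons, List.foldl_nil]
  rw [show ([[]] : List (List Int)).flatMap (fun t =>
      (PySem.List.pyRange (max 0 (x - 1)) (min xs (x + 2)) 1).map (fun v => t ++ [v]))
    = (PySem.List.pyRange (max 0 (x - 1)) (min xs (x + 2)) 1).map (fun v => [v]) by simp]
  simp only [List.flatMap_map, List.flatMap_assoc, pv_filter_flatMap, pv_filterMap_flatMap]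
  apply List.flatMap_congr   -- congruence over the x-range
  intro nx _
  apply List.flatMap_congr   -- congruence over the y-range
  intro ny _
  simp only [List.nil_append, List.cons_append]
  rw [List.filter_map, List.filterMap_map]
  have hp : ((fun t => decide (t ≠ [x, y, z])) ∘ fun v => [nx, ny, v])
      = fun nz => decide ((nx, ny, nz) ≠ (x, y, z)) := by
    funext v
    simp [Function.comp, Prod.ext_iff]
  have hg : (pvToTriple ∘ fun v => [nx, ny, v]) = fun v => some (nx, ny, v) := by
    funext v; rfl
  rw [hp, hg]
  simp

-- empty-cell facts used when a per-axis bound fails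
theorem pvCellA_nil_x (x y z xs ys zs nx ny nz : Int) (h : ¬ (0 ≤ nx ∧ nx < xs)) :
    pvCellA x y z xs ys zs nx ny nz = [] := by
  unfold pvCellA; split_ifs with h1 h2
  · rfl
  · exact absurd ⟨h2.1, h2.2.1⟩ h
  · rfl

theorem pvCellA_nil_y (x y z xs ys zs nx ny nz : Int) (h : ¬ (0 ≤ ny ∧ ny < ys)) :
    pvCellA x y z xs ys zs nx ny nz = [] := by
  unfold pvCellA; split_ifs with h1 h2
  · rfl
  · exact absurd ⟨h2.2.2.1, h2.2.2.2.1⟩ h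
  · rfl

theorem pvCellA_nil_z (x y z xs ys zs nx ny nz : Int) (h : ¬ (0 ≤ nz ∧ nz < zs)) :
    pvCellA x y z xs ys zs nx ny nz = [] := by
  unfold pvCellA; split_ifs with h1 h2
  · rfl
  · exact absurd ⟨h2.2.2.2.2.1, h2.2.2.2.2.2⟩ h
  · rfl

-- the two sides agree cell by cell once the ranges are in candidate-filter form
theorem pv_sides_eq (x y z xs ys zs : Int) :
    [x - 1, x, x + 1].flatMap (fun nx =>
      [y - 1, y, y + 1].flatMap (fun ny =>
        [z - 1, z, z + 1].flatMap (fun nz => pvCellA x y z xs ys zs nx ny nz))) =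
    [x - 1, x, x + 1].flatMap (fun nx =>
      if 0 ≤ nx ∧ nx < xs then
        [y - 1, y, y + 1].flatMap (fun ny =>
          if 0 ≤ ny ∧ ny < ys then
            [z - 1, z, z + 1].flatMap (fun nz =>
              if 0 ≤ nz ∧ nz < zs then
                (if (nx, ny, nz) ≠ (x, y, z) then [(nx, ny, nz)] else [])
              else [])
          else [])
      else []) := by
  have : ∀ nx : Int,
      [y - 1, y, y + 1].flatMap (fun ny =>
        [z - 1, z, z + 1].flatMap (fun nz => pvCellA x y z xs ys zs nx ny nz)) =
      (if 0 ≤ nx ∧ nx < xs then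
        [y - 1, y, y + 1].flatMap (fun ny =>
          if 0 ≤ ny ∧ ny < ys then
            [z - 1, z, z + 1].flatMap (fun nz =>
              if 0 ≤ nz ∧ nz < zs then
                (if (nx, ny, nz) ≠ (x, y, z) then [(nx, ny, nz)] else [])
              else [])
          else [])
      else []) := by
    intro nx
    by_cases hx : 0 ≤ nx ∧ nx < xs
    · rw [if_pos hx]
      have : ∀ ny : Int,
          [z - 1, z, z + 1].flatMap (fun nz => pvCellA x y z xs ys zs nx ny nz) =
          (if 0 ≤ ny ∧ ny < ys then
            [z - 1, z, z + 1].flatMap (fun nz =>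
              if 0 ≤ nz ∧ nz < zs then
                (if (nx, ny, nz) ≠ (x, y, z) then [(nx, ny, nz)] else [])
              else [])
          else []) := by
        intro ny
        by_cases hy : 0 ≤ ny ∧ ny < ys
        · rw [if_pos hy]
          have : ∀ nz : Int, pvCellA x y z xs ys zs nx ny nz =
              (if 0 ≤ nz ∧ nz < zs then
                (if (nx, ny, nz) ≠ (x, y, z) then [(nx, ny, nz)] else [])
              else []) := by
            intro nz
            by_cases hz : 0 ≤ nz ∧ nz < zs
            · by_cases hc : nx = x ∧ ny = y ∧ nz = z
              · simp [pvCellA, hc.1, hc.2.1, hc.2.2]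
              · have hne : (nx, ny, nz) ≠ (x, y, z) := by
                  simp only [ne_eq, Prod.ext_iff]; tauto
                simp [pvCellA, hc, hx, hy, hz, hne]
            · rw [pvCellA_nil_z x y z xs ys zs nx ny nz hz, if_neg hz]
          simp only [this]
        · rw [if_neg hy]
          simp only [pvCellA_nil_y x y z xs ys zs nx _ _ hy]
          simp
      simp only [this]
    · rw [if_neg hx]
      simp only [pvCellA_nil_x x y z xs ys zs nx _ _ hx]
      simp
  simp only [this]

-- B's candidate-filter form equals the nested-if form of pv_sides_eq
theorem pv_B_candidates (x y z xs ys zs : Int) :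
    ([x - 1, x, x + 1].filter (fun n => decide (0 ≤ n) && decide (n < xs))).flatMap (fun nx =>
      ([y - 1, y, y + 1].filter (fun n => decide (0 ≤ n) && decide (n < ys))).flatMap (fun ny =>
        (([z - 1, z, z + 1].filter (fun n => decide (0 ≤ n) && decide (n < zs))).filter
            (fun nz => decide ((nx, ny, nz) ≠ (x, y, z)))).map (fun nz => (nx, ny, nz)))) =
    [x - 1, x, x + 1].flatMap (fun nx =>
      if 0 ≤ nx ∧ nx < xs then
        [y - 1, y, y + 1].flatMap (fun ny =>
          if 0 ≤ ny ∧ ny < ys then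
            [z - 1, z, z + 1].flatMap (fun nz =>
              if 0 ≤ nz ∧ nz < zs then
                (if (nx, ny, nz) ≠ (x, y, z) then [(nx, ny, nz)] else [])
              else [])
          else [])
      else []) := by
  simp only [pv_flatMap_filter, pv_map_filter, List.filter_filter]
  simp [Bool.and_eq_true, decide_eq_true_eq, ite_and]

-- ===== VERDICT (by name: the statement is the Claim_ definition above) =====
theorem get_surrounding_voxel_coords_spec : Claim_equal_get_surrounding_voxel_coords := by
  intro coord voxel_shape _
  obtain ⟨x, y, z⟩ := coord
  obtain ⟨xs, ys, zs⟩ := voxel_shape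
  unfold Spec_get_surrounding_voxel_coords
  rw [pv_A_flatMap, pv_A_nested, pv_B_flatMap, pv_clampRange x xs, pv_clampRange y ys,
    pv_clampRange z zs, pv_B_candidates, pv_sides_eq]
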